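-- pv_equiv track=rewrite | github.com/NajmiHassan/Advent_of_Code_2024 | Day9/part1n2comb.py | find_leftmost_space
-- ===== SOURCE A (Python) =====
-- def find_leftmost_space(blocks, required_length, min_position=0):
--     """Find the leftmost contiguous free space of required length"""
--     current_length = 0
--     start_pos = None
--
--     for pos in range(min_position, len(blocks)):
--         if blocks[pos] == '.':
--             if start_pos is None:
--                 start_pos = pos
--             current_length += 1
--             if current_length >= required_length:
--                 return start_pos
--         else:
--             start_pos = None
--             current_length = 0
--
--     return None
-- ===== SOURCE B (Python) =====
-- def find_leftmost_space(blocks, required_length, min_position=0):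
--     """Find the leftmost contiguous free space of required length"""
--     n = len(blocks)
--     pos = min_position
--     while pos < n:
--         if blocks[pos] == '.':
--             end = pos
--             while end < n and blocks[end] == '.':
--                 end += 1
--             if end - pos >= required_length:
--                 return pos
--             pos = end
--         else:
--             pos += 1
--     return None
-- ===== Notes on version B (the rewrite author's own statement) =====
-- stated objective: alternative
-- what changed: Replaces A's reset-on-non-dot accumulator (current_length/start_pos state) by a find-a-run-then-decide scan: on a dot an inner loop measures the whole contiguous dot run, then B returns its start or jumps past the run.
import Mathlib
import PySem

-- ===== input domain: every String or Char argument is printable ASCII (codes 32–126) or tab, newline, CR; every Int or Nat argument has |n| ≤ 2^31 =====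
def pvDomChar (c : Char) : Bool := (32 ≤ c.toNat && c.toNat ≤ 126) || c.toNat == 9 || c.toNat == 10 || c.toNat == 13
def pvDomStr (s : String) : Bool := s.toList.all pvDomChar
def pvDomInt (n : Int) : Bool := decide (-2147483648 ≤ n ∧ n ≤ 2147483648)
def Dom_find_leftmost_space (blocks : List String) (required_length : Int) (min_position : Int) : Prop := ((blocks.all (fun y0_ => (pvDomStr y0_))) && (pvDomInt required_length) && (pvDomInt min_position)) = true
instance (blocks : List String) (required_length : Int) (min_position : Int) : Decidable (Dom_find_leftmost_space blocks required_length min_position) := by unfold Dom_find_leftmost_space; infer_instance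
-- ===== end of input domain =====

-- B replaces A's reset-on-non-dot run accumulator by a find-a-run-then-decide scan: on a dot it
-- measures the whole contiguous dot run with an inner loop and either returns its start or jumps
-- past it (objective: alternative decomposition, same O(n) cost).

-- ===== PORT A =====
-- A's for-loop over range(min_position, len(blocks)) with state (current_length, start_pos) and an
-- early return, transcribed as structural recursion over the range list.
def find_leftmost_space_go (blocks : List String) (required_length : Int) :
    List Int → Int → Option Int → Option Int
  | [], _, _ => none
  | pos :: rest, current_length, start_pos =>
    if PySem.List.pyGet? blocks pos = some "." then
      let start_pos' := if start_pos = none then some pos else start_pos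
      let current_length' := current_length + 1
      if required_length ≤ current_length' then start_pos'
      else find_leftmost_space_go blocks required_length rest current_length' start_pos'
    else
      find_leftmost_space_go blocks required_length rest 0 none

def find_leftmost_space (blocks : List String) (required_length : Int) (min_position : Int) : Option Int :=
  find_leftmost_space_go blocks required_length
    (PySem.List.pyRange min_position (PySem.List.len blocks) 1) 0 none

-- ===== PORT B =====
-- inner 'while end < n and blocks[end] == ".": end += 1' of B
def pyRunEnd (blocks : List String) (n : Int) (e : Int) : Int :=
  if e < n ∧ PySem.List.pyGet? blocks e = some "." then pyRunEnd blocks n (e + 1) else e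
termination_by (n - e).toNat
decreasing_by omega

-- termination facts for B's outer loop (the port cites them in decreasing_by)
theorem pyRunEnd_ge (blocks : List String) (n : Int) : ∀ e, e ≤ pyRunEnd blocks n e := by
  intro e
  fun_induction pyRunEnd with
  | case1 e h ih => omega
  | case2 e h => omega

theorem pyRunEnd_gt (blocks : List String) (n e : Int)
    (h1 : e < n) (h2 : PySem.List.pyGet? blocks e = some ".") :
    e < pyRunEnd blocks n e := by
  rw [pyRunEnd]
  simp only [h1, h2, and_self, if_true]
  have := pyRunEnd_ge blocks n (e + 1)
  omega

-- outer 'while pos < n' of B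
def find_leftmost_space_alt_go (blocks : List String) (n required_length : Int) (pos : Int) :
    Option Int :=
  if h : pos < n then
    if hd : PySem.List.pyGet? blocks pos = some "." then
      let e := pyRunEnd blocks n pos
      if required_length ≤ e - pos then some pos
      else find_leftmost_space_alt_go blocks n required_length e
    else
      find_leftmost_space_alt_go blocks n required_length (pos + 1)
  else none
termination_by (n - pos).toNat
decreasing_by
  · have := pyRunEnd_gt blocks n pos h hd; omega
  · omega

def find_leftmost_space_alt (blocks : List String) (required_length : Int) (min_position : Int) :
    Option Int :=
  find_leftmost_space_alt_go blocks (PySem.List.len blocks) required_length min_position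

-- ===== PRECONDITION & SPEC =====
-- Pre_ excludes only min_position < -len(blocks): there Python's A (and B alike) raises IndexError
-- on blocks[pos]; everywhere A returns is inside Pre_.
def Pre_find_leftmost_space (blocks : List String) (required_length : Int) (min_position : Int) : Prop :=
  -(blocks.length : Int) ≤ min_position
instance (blocks : List String) (required_length : Int) (min_position : Int) : Decidable (Pre_find_leftmost_space blocks required_length min_position) := by unfold Pre_find_leftmost_space; infer_instance

def pvWitness_find_leftmost_space : List String × Int × Int := (["0", ".", ".", "1"], 2, 0)

def Spec_find_leftmost_space (blocks : List String) (required_length : Int) (min_position : Int) (out : Option Int) : Prop := out = find_leftmost_space_alt blocks required_length min_position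
instance (blocks : List String) (required_length : Int) (min_position : Int) (out : Option Int) : Decidable (Spec_find_leftmost_space blocks required_length min_position out) := by unfold Spec_find_leftmost_space; infer_instance

-- ===== CLAIM (what is proved, stated in full; the proofs are below) =====
def Claim_equal_find_leftmost_space : Prop := ∀ (blocks : List String) (required_length : Int) (min_position : Int), Dom_find_leftmost_space blocks required_length min_position → Pre_find_leftmost_space blocks required_length min_position → Spec_find_leftmost_space blocks required_length min_position (find_leftmost_space blocks required_length min_position)

-- ===== LEMMAS AND PROOFS =====

-- every position strictly inside a dot run is an in-range dot
theorem pyRunEnd_dots (blocks : List String) (n : Int) :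
    ∀ s p, s ≤ p → p < pyRunEnd blocks n s →
      PySem.List.pyGet? blocks p = some "." ∧ p < n := by
  intro s
  fun_induction pyRunEnd with
  | case1 e h ih =>
    intro p hle hlt
    rcases eq_or_lt_of_le hle with rfl | hlt'
    · exact ⟨h.2, h.1⟩
    · exact ih p (by omega) hlt
  | case2 e h =>
    intro p hle hlt
    omega

-- the run end is not itself an in-range dot
theorem pyRunEnd_stop (blocks : List String) (n : Int) (s : Int) :
    ¬ (pyRunEnd blocks n s < n ∧
       PySem.List.pyGet? blocks (pyRunEnd blocks n s) = some ".") := by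
  fun_induction pyRunEnd with
  | case1 e h ih => exact ih
  | case2 e h => exact h

-- A's scan from inside the dot run [s, pyRunEnd s): it returns s iff the run is long enough,
-- otherwise it resumes with a fresh state at the run end.
theorem runA (blocks : List String) (req n : Int) (s : Int) :
    ∀ m p st, (pyRunEnd blocks n s - p).toNat = m → s ≤ p → p < pyRunEnd blocks n s →
      (st = some s ∨ (st = none ∧ p = s)) →
      find_leftmost_space_go blocks req (PySem.List.pyRange p n 1) (p - s) st =
        (if req ≤ pyRunEnd blocks n s - s then some s
         else find_leftmost_space_go blocks req
                (PySem.List.pyRange (pyRunEnd blocks n s) n 1) 0 none) := by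
  intro m
  induction m using Nat.strong_induction_on with
  | _ m IH =>
    intro p st hm hsp hpe hst
    obtain ⟨hdot, hpn⟩ := pyRunEnd_dots blocks n s p hsp hpe
    rw [PySem.List.pyRange_one_cons hpn]
    rw [find_leftmost_space_go]
    have hsp' : (if st = none then some p else st) = some s := by
      rcases hst with rfl | ⟨rfl, rfl⟩ <;> simp
    simp only [hdot, if_true, hsp']
    by_cases hreq : req ≤ p - s + 1
    · rw [if_pos hreq, if_pos (by omega)]
    · rw [if_neg hreq]
      by_cases hnext : p + 1 < pyRunEnd blocks n s
      · have := IH (pyRunEnd blocks n s - (p + 1)).toNat (by omega) (p + 1) (some s)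
          rfl (by omega) hnext (Or.inl rfl)
        have harith : p + 1 - s = p - s + 1 := by omega
        rw [← harith, this]
      · -- the run ends exactly at p + 1: fresh state and leftover state agree at the run end
        have he : pyRunEnd blocks n s = p + 1 := by omega
        rw [if_neg (by omega), he]
        have hstop := pyRunEnd_stop blocks n s
        rw [he] at hstop
        by_cases hn : p + 1 < n
        · have hnd : ¬ PySem.List.pyGet? blocks (p + 1) = some "." := fun hc => hstop ⟨hn, hc⟩
          rw [PySem.List.pyRange_one_cons hn]
          rw [find_leftmost_space_go, find_leftmost_space_go]
          simp only [hnd, if_false]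
        · rw [PySem.List.pyRange_one_eq_nil (by omega)]
          rfl

-- the two scans agree from every starting position
theorem mainEq (blocks : List String) (req n : Int) :
    ∀ p, find_leftmost_space_go blocks req (PySem.List.pyRange p n 1) 0 none =
      find_leftmost_space_alt_go blocks n req p := by
  intro p
  fun_induction find_leftmost_space_alt_go with
  | case1 pos h hd e hreq =>
    -- dot at pos, run long enough: A returns the run start pos
    have hgt := pyRunEnd_gt blocks n pos h hd
    have := runA blocks req n pos (pyRunEnd blocks n pos - pos).toNat pos none rfl le_rfl hgt
      (Or.inr ⟨rfl, rfl⟩)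
    simp only [sub_self] at this
    rw [this, if_pos hreq]
  | case2 pos h hd e hreq ih =>
    have hgt := pyRunEnd_gt blocks n pos h hd
    have := runA blocks req n pos (pyRunEnd blocks n pos - pos).toNat pos none rfl le_rfl hgt
      (Or.inr ⟨rfl, rfl⟩)
    simp only [sub_self] at this
    rw [this, if_neg hreq, ih]
  | case3 pos h hd ih =>
    rw [PySem.List.pyRange_one_cons h, find_leftmost_space_go]
    simp only [hd, if_false, ih]
  | case4 pos h =>
    rw [PySem.List.pyRange_one_eq_nil (by omega)]
    rfl

-- ===== VERDICT (by name: the statement is the Claim_ definition above) =====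
theorem find_leftmost_space_spec : Claim_equal_find_leftmost_space := by
  intro blocks required_length min_position _ _
  unfold Spec_find_leftmost_space find_leftmost_space find_leftmost_space_alt
  exact mainEq blocks required_length (PySem.List.len blocks) min_position
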